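-- pv_equiv track=rewrite | github.com/khushisrivastava/DSA | CodeForces/ABCString.py | calc
-- ===== SOURCE A (Python) =====
-- def calc(s):
--     char_1 = s[0]
--     stack = []
--     for ele in s:
--         if ele == char_1:
--             stack.append(ele)
--         else:
--             if len(stack) > 0:
--                 stack.pop()
--             else:
--                 return "NO"
--     if len(stack) == 0:
--         return "YES"
--     else:
--         return "NO"
-- ===== SOURCE B (Python) =====
-- def calc(s):
--     c = s[0]
--     total = 0
--     best = 0
--     for ele in reversed(s):
--         total += 1 if ele == c else -1
--         best = max(best, total)
--     return "YES" if total == 0 and best <= 0 else "NO"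
-- ===== Notes on version B (the rewrite author's own statement) =====
-- stated objective: alternative
-- what changed: Replaces the early-returning stack simulation with a single back-to-front scan maintaining the running suffix balance and its maximum; the answer is YES iff the total balance is 0 and no suffix balance is positive.
import Mathlib
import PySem

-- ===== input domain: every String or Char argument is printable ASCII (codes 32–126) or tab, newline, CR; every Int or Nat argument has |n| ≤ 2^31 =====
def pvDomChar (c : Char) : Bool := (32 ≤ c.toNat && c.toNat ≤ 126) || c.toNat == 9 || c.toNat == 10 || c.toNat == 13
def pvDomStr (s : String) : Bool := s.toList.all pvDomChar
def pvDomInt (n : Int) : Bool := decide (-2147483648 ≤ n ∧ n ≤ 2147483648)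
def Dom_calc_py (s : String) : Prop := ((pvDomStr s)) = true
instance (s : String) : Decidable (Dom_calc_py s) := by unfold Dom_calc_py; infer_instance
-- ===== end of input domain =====

-- B replaces A's early-returning stack loop by a back-to-front scan of suffix balances; equivalence is proved on nonempty strings (A raises IndexError on "").

-- ===== PORT A =====
-- the for-loop over s with the stack, early "NO" included
def calcGo (char1 : Char) (stack : List Char) : List Char → String
  | [] => if stack.length = 0 then "YES" else "NO"
  | ele :: rest =>
    if ele = char1 then
      calcGo char1 (stack ++ [ele]) rest
    else
      if stack.length > 0 then
        calcGo char1 stack.dropLast rest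
      else
        "NO"

def calc_py (s : String) : String :=
  match PySem.Str.pyGet? s 0 with
  | none => "NO"  -- unreachable inside Pre_: Python raises IndexError on ""
  | some char1 => calcGo char1 [] s.toList

-- ===== PORT B =====
def calc_py_alt (s : String) : String :=
  match PySem.Str.pyGet? s 0 with
  | none => "NO"  -- unreachable inside Pre_: Python raises IndexError on ""
  | some c =>
    let tb := s.toList.reverse.foldl
      (fun (st : Int × Int) ele =>
        let t := st.1 + (if ele = c then (1 : Int) else -1)
        (t, max st.2 t)) (0, 0)
    if tb.1 = 0 ∧ tb.2 ≤ 0 then "YES" else "NO"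

-- ===== PRECONDITION & SPEC =====
-- Pre_ excludes only the empty string, on which A raises IndexError (s[0]).
def Pre_calc_py (s : String) : Prop := s ≠ ""
instance (s : String) : Decidable (Pre_calc_py s) := by unfold Pre_calc_py; infer_instance
def pvWitness_calc_py : String := "abab"

def Spec_calc_py (s : String) (out : String) : Prop := out = calc_py_alt s
instance (s : String) (out : String) : Decidable (Spec_calc_py s out) := by unfold Spec_calc_py; infer_instance

-- ===== CLAIM (what is proved, stated in full; the proofs are below) =====
def Claim_equal_calc_py : Prop := ∀ (s : String), Dom_calc_py s → Pre_calc_py s → Spec_calc_py s (calc_py s)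

-- ===== LEMMAS AND PROOFS =====

-- balance of a list of characters: +1 for c, -1 otherwise
def pvBal (c : Char) : List Char → Int
  | [] => 0
  | x :: t => (if x = c then (1 : Int) else -1) + pvBal c t

-- maximum balance over all suffixes (including the empty one)
def pvMsuf (c : Char) : List Char → Int
  | [] => 0
  | x :: t => max ((if x = c then (1 : Int) else -1) + pvBal c t) (pvMsuf c t)

theorem pvMsuf_nonneg (c : Char) (l : List Char) : 0 ≤ pvMsuf c l := by
  induction l with
  | nil => simp [pvMsuf]
  | cons x t ih => simp only [pvMsuf]; omega

theorem pvBal_le_msuf (c : Char) (l : List Char) : pvBal c l ≤ pvMsuf c l := by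
  cases l with
  | nil => simp [pvBal, pvMsuf]
  | cons x t => simp only [pvBal, pvMsuf]; omega

-- A's loop returns YES iff the stack empties exactly and no pop ever fails,
-- characterised through the suffix-balance maximum.
theorem calcGo_eq (c : Char) (l : List Char) : ∀ (stack : List Char),
    calcGo c stack l =
      if (stack.length : Int) + pvBal c l = 0 ∧ pvMsuf c l ≤ (stack.length : Int) + pvBal c l
      then "YES" else "NO" := by
  induction l with
  | nil =>
    intro stack
    simp only [calcGo, pvBal, pvMsuf, add_zero]
    split_ifs with h1 h2 h2 <;> try rfl
    · exact absurd ⟨by omega, by omega⟩ h2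
    · exfalso; omega
  | cons x t ih =>
    intro stack
    have h1 := pvBal_le_msuf c t
    have h2 := pvMsuf_nonneg c t
    by_cases hx : x = c
    · simp only [calcGo, hx, ih, pvBal, pvMsuf, List.length_append,
        List.length_singleton]
      split_ifs <;> try rfl
      all_goals (exfalso; push_cast at *; omega)
    · simp only [calcGo, pvBal, pvMsuf, if_neg hx]
      by_cases hs : stack.length > 0
      · rw [if_pos hs, ih]
        have hd : stack.dropLast.length = stack.length - 1 := List.length_dropLast
        rw [hd]
        split_ifs <;> try rfl
        all_goals (exfalso; push_cast [Nat.cast_sub (by omega : 1 ≤ stack.length)] at *; omega)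
      · rw [if_neg hs]
        have hz : stack.length = 0 := by omega
        rw [hz]
        split_ifs with h3
        · exfalso; push_cast at h3; omega
        · rfl

-- B's backwards fold computes (total balance, max suffix balance shifted by the start state)
theorem pvFold_eq (c : Char) (l : List Char) : ∀ (t0 b0 : Int), t0 ≤ b0 →
    l.reverse.foldl
      (fun (st : Int × Int) ele =>
        let t := st.1 + (if ele = c then (1 : Int) else -1)
        (t, max st.2 t)) (t0, b0)
    = (t0 + pvBal c l, max b0 (t0 + pvMsuf c l)) := by
  induction l with
  | nil =>
    intro t0 b0 h
    simp only [List.reverse_nil, List.foldl_nil, pvBal, pvMsuf, Prod.mk.injEq]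
    omega
  | cons x t ih =>
    intro t0 b0 h
    rw [List.reverse_cons, List.foldl_append, ih t0 b0 h]
    simp only [List.foldl_cons, List.foldl_nil, pvBal, pvMsuf, Prod.mk.injEq]
    constructor <;> omega

-- ===== VERDICT (by name: the statement is the Claim_ definition above) =====
theorem calc_py_spec : Claim_equal_calc_py := by
  intro s _ _
  unfold Spec_calc_py calc_py calc_py_alt
  cases h : PySem.Str.pyGet? s 0 with
  | none => rfl
  | some c =>
    simp only [calcGo_eq, pvFold_eq c s.toList 0 0 le_rfl]
    have h1 := pvMsuf_nonneg c s.toList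
    split_ifs with h2 h3 h3 <;> try rfl
    all_goals (exfalso; simp only [List.length_nil, Nat.cast_zero] at h2; omega)
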